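-- pv_equiv track=rewrite | github.com/Nahaeran/baekjoon-algorithm | 별_찍기/2447_별_찍기-10.py | fractal_rectangle
-- ===== SOURCE A (Python) =====
-- def fractal_rectangle(num):
--     if num == 1:
--         return ["*"]
--
--     result = []
--     lst = fractal_rectangle(num // 3)
--
--     # 첫 번째 줄
--     for e in lst:
--         result.append(e * 3)
--     # 두 번째 줄
--     for e in lst:
--         result.append(e + (" " * (num // 3)) + e)
--     # 세 번째 줄
--     for e in lst:
--         result.append(e * 3)
--
--     return result
-- ===== SOURCE B (Python) =====
-- def fractal_rectangle(num):
--     # Iterative re-implementation: compute the chain of sub-sizes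
--     # num, num//3, ..., 1 once, then build each row independently from the
--     # base-3 digits of its index (low digit first), instead of recursively
--     # assembling 3x3 blocks of sub-patterns.
--     sizes = [num]
--     while sizes[-1] > 1:
--         sizes.append(sizes[-1] // 3)
--     d = len(sizes) - 1
--     rows = []
--     for i in range(3 ** d):
--         s = "*"
--         ii = i
--         for w in reversed(sizes[1:]):
--             if ii % 3 == 1:
--                 s = s + " " * w + s
--             else:
--                 s = s * 3
--             ii //= 3
--         rows.append(s)
--     return rows
-- ===== Notes on version B (the rewrite author's own statement) =====
-- stated objective: alternative
-- what changed: Replaces A's recursive assembly of 3x3 blocks of sub-patterns with a non-recursive construction: the chain of sub-sizes num, num//3, ..., 1 is computed once, and each row is then built independently by scanning the base-3 digits of its row index (low digit first) against that chain.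
import Mathlib
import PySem

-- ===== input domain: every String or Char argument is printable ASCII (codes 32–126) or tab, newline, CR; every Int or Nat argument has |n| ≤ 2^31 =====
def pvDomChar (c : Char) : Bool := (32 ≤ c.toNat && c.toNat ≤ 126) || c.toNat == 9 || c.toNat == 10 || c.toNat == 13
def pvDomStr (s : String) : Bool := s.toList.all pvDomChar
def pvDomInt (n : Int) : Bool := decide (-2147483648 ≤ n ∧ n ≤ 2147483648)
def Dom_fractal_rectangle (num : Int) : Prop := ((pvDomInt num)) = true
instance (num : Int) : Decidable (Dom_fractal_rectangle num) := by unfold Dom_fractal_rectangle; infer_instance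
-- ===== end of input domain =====

-- B replaces A's recursive 3×3-block assembly by a non-recursive per-row construction
-- driven by the base-3 digits of the row index and the precomputed size chain
-- (objective: alternative; return values proved identical on Pre_).

-- ===== PORT A =====
-- Rows are kept as List Char (PySem convention: string facts on the list side);
-- the wrapper applies String.ofList once at the end.  'e * 3' is written out as
-- e ++ e ++ e (exact for the constant count 3); '" " * w' is
-- List.replicate w.toNat ' ' (exact: a negative w gives the empty string).
-- The recursion 'fractal_rectangle(num // 3)' gets fuel num.toNat + 1,
-- sufficient for every input on which the Python recursion terminates.
def pvARows (fuel : Nat) (num : Int) : List (List Char) :=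
  match fuel with
  | 0 => []
  | f + 1 =>
    if num = 1 then [['*']]
    else
      let lst := pvARows f (PySem.Int.floordiv num 3)
      (lst.map fun e => e ++ e ++ e)
      ++ (lst.map fun e => e ++ List.replicate (PySem.Int.floordiv num 3).toNat ' ' ++ e)
      ++ (lst.map fun e => e ++ e ++ e)

def fractal_rectangle (num : Int) : List String :=
  (pvARows (num.toNat + 1) num).map String.ofList

-- ===== PORT B =====
-- 'sizes = [num]; while sizes[-1] > 1: sizes.append(sizes[-1] // 3)', fuel as for A
def pvChain (fuel : Nat) (n : Int) : List Int :=
  match fuel with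
  | 0 => [n]
  | f + 1 => if 1 < n then n :: pvChain f (PySem.Int.floordiv n 3) else [n]

-- body of B's inner loop: state (s, ii), one step per width w
def pvStep (sw : List Char × Int) (w : Int) : List Char × Int :=
  (if PySem.Int.mod sw.2 3 = 1
     then sw.1 ++ List.replicate w.toNat ' ' ++ sw.1
     else sw.1 ++ sw.1 ++ sw.1,
   PySem.Int.floordiv sw.2 3)

-- the two loops over range(3 ** d) and reversed(sizes[1:])
def pvRowsB (sizes : List Int) : List String :=
  (PySem.List.pyRange 0 ((3 : Int) ^ (sizes.length - 1))).map fun i =>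
    String.ofList ((sizes.tail.reverse.foldl pvStep (['*'], i)).1)

def fractal_rectangle_alt (num : Int) : List String :=
  pvRowsB (pvChain (num.toNat + 1) num)

-- ===== PRECONDITION & SPEC =====
-- Pre_ holds exactly where the Python A terminates: repeated floor division by 3
-- reaches 1, i.e. 3^k ≤ num < 2*3^k for the (unique possible) k = log₃ num;
-- elsewhere A never returns (it exceeds Python's recursion limit: RecursionError),
-- so nothing is claimed there.
def Pre_fractal_rectangle (num : Int) : Prop :=
  1 ≤ num ∧ num < 2 * 3 ^ (Nat.log 3 num.toNat)
instance (num : Int) : Decidable (Pre_fractal_rectangle num) := by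
  unfold Pre_fractal_rectangle; infer_instance

def pvWitness_fractal_rectangle : Int := 3

def Spec_fractal_rectangle (num : Int) (out : List String) : Prop := out = fractal_rectangle_alt num
instance (num : Int) (out : List String) : Decidable (Spec_fractal_rectangle num out) := by unfold Spec_fractal_rectangle; infer_instance

-- ===== CLAIM (what is proved, stated in full; the proofs are below) =====
def Claim_equal_fractal_rectangle : Prop := ∀ (num : Int), Dom_fractal_rectangle num → Pre_fractal_rectangle num → Spec_fractal_rectangle num (fractal_rectangle num)

-- ===== LEMMAS AND PROOFS =====

-- canonical row i of the depth-k pattern for the size chain starting at m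
def canonRow : Nat → Nat → Nat → List Char
  | 0, _, _ => ['*']
  | k + 1, m, i =>
      let s := canonRow k (m / 3) i
      if i / 3 ^ k % 3 = 1 then s ++ List.replicate (m / 3) ' ' ++ s else s ++ s ++ s

-- the size chain and the width list, on the Nat side
def chainL : Nat → Nat → List Int
  | 0, m => [(m : Int)]
  | k + 1, m => (m : Int) :: chainL k (m / 3)

def Wl : Nat → Nat → List Int
  | 0, _ => []
  | k + 1, m => Wl k (m / 3) ++ [((m / 3 : Nat) : Int)]

lemma pv_floordiv3 (m : Nat) : PySem.Int.floordiv (m : Int) 3 = ((m / 3 : Nat) : Int) := by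
  exact_mod_cast PySem.Int.floordiv_natCast m 3

lemma pv_mod3 (m : Nat) : PySem.Int.mod (m : Int) 3 = ((m % 3 : Nat) : Int) := by
  exact_mod_cast PySem.Int.mod_natCast m 3

lemma canonRow_add (k : Nat) : ∀ (m c r : Nat), canonRow k m (c * 3 ^ k + r) = canonRow k m r := by
  induction k with
  | zero => intro m c r; rfl
  | succ k ih =>
    intro m c r
    have hp : 0 < 3 ^ k := Nat.pow_pos (by norm_num)
    have h1 : c * 3 ^ (k + 1) + r = (3 * c) * 3 ^ k + r := by ring
    have h2 : ((3 * c) * 3 ^ k + r) / 3 ^ k % 3 = r / 3 ^ k % 3 := by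
      rw [Nat.add_comm, Nat.add_mul_div_right _ _ hp, Nat.add_mul_mod_self_left]
    simp only [canonRow, h1, ih, h2]

lemma chainL_eq (k : Nat) : ∀ (m f : Nat), 3 ^ k ≤ m → m < 2 * 3 ^ k → k < f →
    pvChain f (m : Int) = chainL k m := by
  induction k with
  | zero =>
    intro m f h1 h2 hf
    have hm : m = 1 := by simp only [pow_zero] at h1 h2; omega
    subst hm
    match f, hf with
    | f + 1, _ => simp [pvChain, chainL]
  | succ k ih =>
    intro m f h1 h2 hf
    match f, hf with
    | f + 1, hf =>
      have hm3 : (3 : Nat) ≤ m := le_trans (by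
        have : (3 : Nat) ^ 1 ≤ 3 ^ (k + 1) := Nat.pow_le_pow_right (by norm_num) (by omega)
        simpa using this) h1
      have hgt : (1 : Int) < (m : Int) := by exact_mod_cast (by omega : 1 < m)
      have hd1 : 3 ^ k ≤ m / 3 := Nat.le_div_iff_mul_le (by norm_num) |>.mpr (by
        calc 3 ^ k * 3 = 3 ^ (k + 1) := (pow_succ 3 k).symm
        _ ≤ m := h1)
      have hd2 : m / 3 < 2 * 3 ^ k := (Nat.div_lt_iff_lt_mul (by norm_num)).mpr (by
        calc m < 2 * 3 ^ (k + 1) := h2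
        _ = 2 * 3 ^ k * 3 := by ring)
      simp only [pvChain, if_pos hgt, pv_floordiv3, chainL]
      rw [ih (m / 3) f hd1 hd2 (by omega)]

lemma chainL_rev (k : Nat) : ∀ m : Nat, (chainL k m).reverse = Wl k m ++ [(m : Int)] := by
  induction k with
  | zero => intro m; simp [chainL, Wl]
  | succ k ih => intro m; simp [chainL, Wl, ih (m / 3)]

lemma chainL_tail_rev (k m : Nat) : (chainL k m).tail.reverse = Wl k m := by
  cases k with
  | zero => simp [chainL, Wl]
  | succ k => simp only [chainL, List.tail_cons]; rw [chainL_rev k (m / 3)]; rfl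

lemma chainL_length (k : Nat) : ∀ m : Nat, (chainL k m).length = k + 1 := by
  induction k with
  | zero => intro m; rfl
  | succ k ih => intro m; simp [chainL, ih (m / 3)]

lemma fold_eq (k : Nat) : ∀ (m i : Nat),
    (Wl k m).foldl pvStep (['*'], (i : Int)) = (canonRow k m i, ((i / 3 ^ k : Nat) : Int)) := by
  induction k with
  | zero => intro m i; simp [Wl, canonRow]
  | succ k ih =>
    intro m i
    simp only [Wl, List.foldl_append, List.foldl_cons, List.foldl_nil, ih (m / 3) i]
    have hmod : PySem.Int.mod ((i / 3 ^ k : Nat) : Int) 3 = (((i / 3 ^ k) % 3 : Nat) : Int) :=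
      pv_mod3 _
    have hdiv : PySem.Int.floordiv ((i / 3 ^ k : Nat) : Int) 3 = ((i / 3 ^ (k + 1) : Nat) : Int) := by
      rw [pv_floordiv3, Nat.div_div_eq_div_mul, ← pow_succ]
    simp only [pvStep, hmod, hdiv]
    by_cases h : i / 3 ^ k % 3 = 1
    · rw [if_pos (show (((i / 3 ^ k) % 3 : Nat) : Int) = 1 by exact_mod_cast h)]
      simp only [canonRow, if_pos h, Int.toNat_natCast]
    · rw [if_neg (fun hc => h (by exact_mod_cast hc))]
      simp only [canonRow, if_neg h]

lemma pvARows_eq (k : Nat) : ∀ (m f : Nat), 3 ^ k ≤ m → m < 2 * 3 ^ k → k < f →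
    pvARows f (m : Int) = (List.range (3 ^ k)).map (canonRow k m) := by
  induction k with
  | zero =>
    intro m f h1 h2 hf
    have hm : m = 1 := by simp only [pow_zero] at h1 h2; omega
    subst hm
    match f, hf with
    | f + 1, _ => simp [pvARows, canonRow]
  | succ k ih =>
    intro m f h1 h2 hf
    match f, hf with
    | f + 1, hf =>
      have hm3 : (3 : Nat) ≤ m := le_trans (by
        have : (3 : Nat) ^ 1 ≤ 3 ^ (k + 1) := Nat.pow_le_pow_right (by norm_num) (by omega)
        simpa using this) h1
      have hne : ¬ ((m : Int) = 1) := by exact_mod_cast (by omega : ¬ m = 1)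
      have hd1 : 3 ^ k ≤ m / 3 := Nat.le_div_iff_mul_le (by norm_num) |>.mpr (by
        calc 3 ^ k * 3 = 3 ^ (k + 1) := (pow_succ 3 k).symm
        _ ≤ m := h1)
      have hd2 : m / 3 < 2 * 3 ^ k := (Nat.div_lt_iff_lt_mul (by norm_num)).mpr (by
        calc m < 2 * 3 ^ (k + 1) := h2
        _ = 2 * 3 ^ k * 3 := by ring)
      have hlst := ih (m / 3) f hd1 hd2 (by omega)
      have hp : 0 < 3 ^ k := Nat.pow_pos (by norm_num)
      have hsplit : List.range (3 ^ (k + 1)) =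
          List.range (3 ^ k) ++ ((List.range (3 ^ k)).map (3 ^ k + ·)
            ++ (List.range (3 ^ k)).map (2 * 3 ^ k + ·)) := by
        have h3 : 3 ^ (k + 1) = 3 ^ k + (3 ^ k + 3 ^ k) := by ring
        rw [h3, List.range_add, List.range_add, List.map_append, List.map_map]
        congr 2
        apply List.map_congr_left
        intro a _
        simp only [Function.comp_apply]
        omega
      have b0 : (List.range (3 ^ k)).map (canonRow (k + 1) m)
          = (List.range (3 ^ k)).map ((fun e => e ++ e ++ e) ∘ canonRow k (m / 3)) := by
        apply List.map_congr_left
        intro r hr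
        have hr' : r < 3 ^ k := List.mem_range.mp hr
        simp [canonRow, Nat.div_eq_of_lt hr']
      have b1 : (List.range (3 ^ k)).map (canonRow (k + 1) m ∘ (3 ^ k + ·))
          = (List.range (3 ^ k)).map
              ((fun e => e ++ List.replicate (m / 3) ' ' ++ e) ∘ canonRow k (m / 3)) := by
        apply List.map_congr_left
        intro r hr
        have hr' : r < 3 ^ k := List.mem_range.mp hr
        have hq : (3 ^ k + r) / 3 ^ k % 3 = 1 := by
          rw [Nat.add_comm, Nat.add_div_right _ hp, Nat.div_eq_of_lt hr']
        have hadd : canonRow k (m / 3) (3 ^ k + r) = canonRow k (m / 3) r := by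
          have h1r : 3 ^ k + r = 1 * 3 ^ k + r := by ring
          rw [h1r, canonRow_add]
        simp only [Function.comp_apply, canonRow]
        rw [if_pos hq, hadd]
      have b2 : (List.range (3 ^ k)).map (canonRow (k + 1) m ∘ (2 * 3 ^ k + ·))
          = (List.range (3 ^ k)).map ((fun e => e ++ e ++ e) ∘ canonRow k (m / 3)) := by
        apply List.map_congr_left
        intro r hr
        have hr' : r < 3 ^ k := List.mem_range.mp hr
        have hq : (2 * 3 ^ k + r) / 3 ^ k % 3 = 2 := by
          rw [Nat.add_comm, Nat.add_mul_div_right _ _ hp, Nat.div_eq_of_lt hr']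
        have hne1 : ¬ ((2 * 3 ^ k + r) / 3 ^ k % 3 = 1) := by rw [hq]; norm_num
        have hadd : canonRow k (m / 3) (2 * 3 ^ k + r) = canonRow k (m / 3) r :=
          canonRow_add k (m / 3) 2 r
        simp only [Function.comp_apply, canonRow]
        rw [if_neg hne1, hadd]
      simp only [pvARows, if_neg hne, pv_floordiv3, hlst, Int.toNat_natCast, hsplit,
        List.map_append, List.map_map, b0, b1, b2]
      rw [List.append_assoc]

lemma alt_eq (k m : Nat) (h1 : 3 ^ k ≤ m) (h2 : m < 2 * 3 ^ k) :
    fractal_rectangle_alt (m : Int)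
      = (List.range (3 ^ k)).map (fun r => String.ofList (canonRow k m r)) := by
  have hk : k < (m : Int).toNat + 1 := by
    have : k < 3 ^ k := Nat.lt_pow_self (by norm_num)
    simp only [Int.toNat_natCast]; omega
  unfold fractal_rectangle_alt
  rw [chainL_eq k m _ h1 h2 hk]
  unfold pvRowsB
  rw [chainL_length]
  have hpow : ((3 : Int) ^ (k + 1 - 1)) = (((3 ^ k : Nat)) : Int) := by push_cast; norm_num
  rw [hpow, PySem.List.pyRange_zero_natCast, List.map_map]
  apply List.map_congr_left
  intro r _
  simp only [Function.comp_apply]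
  rw [chainL_tail_rev, fold_eq k m r]

-- ===== VERDICT (by name: the statement is the Claim_ definition above) =====
theorem fractal_rectangle_spec : Claim_equal_fractal_rectangle := by
  intro num _ hpre
  obtain ⟨h1n, h2⟩ := hpre
  set k := Nat.log 3 num.toNat with hkdef
  have hnum0 : (0 : Int) ≤ num := le_trans (by norm_num) h1n
  have htn : 1 ≤ num.toNat := by omega
  have h1 : (3 : Int) ^ k ≤ num := by
    have := Nat.pow_log_le_self 3 (by omega : num.toNat ≠ 0)
    calc (3 : Int) ^ k = ((3 ^ k : Nat) : Int) := by push_cast; ring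
      _ ≤ (num.toNat : Int) := by exact_mod_cast this
      _ = num := Int.toNat_of_nonneg hnum0
  obtain ⟨m, rfl⟩ : ∃ m : Nat, num = (m : Int) := ⟨num.toNat, (Int.toNat_of_nonneg hnum0).symm⟩
  have h1' : 3 ^ k ≤ m := by exact_mod_cast h1
  have h2' : m < 2 * 3 ^ k := by exact_mod_cast h2
  show fractal_rectangle (m : Int) = fractal_rectangle_alt (m : Int)
  have hk : k < (m : Int).toNat + 1 := by
    have : k < 3 ^ k := Nat.lt_pow_self (by norm_num)
    simp only [Int.toNat_natCast]; omega
  unfold fractal_rectangle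
  rw [pvARows_eq k m _ h1' h2' hk, alt_eq k m h1' h2', List.map_map]
  exact List.map_congr_left (fun r _ => rfl)
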